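-- pv_equiv track=rewrite | github.com/Isuru-Dissanayake/AIA-IEEEXtreme | Rumour.py | find_anc
-- ===== SOURCE A (Python) =====
-- def find_anc(k):
--     anc = []
--     t = k
--     anc.append(t)
--     while t>1:
--         t = int(t/2)
--         anc.append(t)
--     return (anc)
-- ===== SOURCE B (Python) =====
-- def find_anc(k):
--     if k <= 1:
--         return [k]
--     return [k] + find_anc(int(k / 2))
-- ===== Notes on version B (the rewrite author's own statement) =====
-- stated objective: simpler
-- what changed: Replaces the while-loop with an accumulator list by direct recursion on the ancestor chain, prepending the node and recursing on its parent.
import Mathlib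
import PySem

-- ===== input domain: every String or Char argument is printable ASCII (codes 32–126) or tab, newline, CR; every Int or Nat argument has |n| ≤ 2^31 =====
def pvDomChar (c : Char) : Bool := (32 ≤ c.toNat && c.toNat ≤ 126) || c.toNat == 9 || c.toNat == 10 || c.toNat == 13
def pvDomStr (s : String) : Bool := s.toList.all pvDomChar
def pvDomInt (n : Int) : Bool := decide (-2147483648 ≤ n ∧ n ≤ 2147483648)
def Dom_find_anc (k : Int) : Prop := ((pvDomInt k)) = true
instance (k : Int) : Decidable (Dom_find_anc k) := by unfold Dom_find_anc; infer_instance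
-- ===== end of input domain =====

-- ===== PORT A =====
-- B: direct recursion on the ancestor chain instead of a while-loop with an accumulator (objective: simpler).
-- while t>1: t = int(t/2); anc.append(t)  — int(t/2) truncates toward zero = Int division `/` in Lean
def find_anc_loop (t : Int) (anc : List Int) : List Int :=
  if t > 1 then find_anc_loop (t / 2) (anc ++ [t / 2]) else anc
termination_by t.toNat
decreasing_by
  have h1 : (1:Int) < t := by omega
  have : t / 2 < t := by omega
  have : 0 ≤ t / 2 := by omega
  omega

def find_anc (k : Int) : List Int :=
  find_anc_loop k [k]

-- ===== PORT B =====
def find_anc_alt (k : Int) : List Int :=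
  if k ≤ 1 then [k] else k :: find_anc_alt (k / 2)
termination_by k.toNat
decreasing_by
  have h1 : (1:Int) < k := by omega
  have : k / 2 < k := by omega
  have : 0 ≤ k / 2 := by omega
  omega

-- ===== PRECONDITION & SPEC =====
def Spec_find_anc (k : Int) (out : List Int) : Prop := out = find_anc_alt k
instance (k : Int) (out : List Int) : Decidable (Spec_find_anc k out) := by unfold Spec_find_anc; infer_instance

-- ===== CLAIM (what is proved, stated in full; the proofs are below) =====
def Claim_equal_find_anc : Prop := ∀ (k : Int), Dom_find_anc k → Spec_find_anc k (find_anc k)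

-- ===== LEMMAS AND PROOFS =====
theorem alt_cons (t : Int) :
    find_anc_alt t = t :: (if t ≤ 1 then ([] : List Int) else find_anc_alt (t / 2)) := by
  rw [find_anc_alt]; split <;> simp_all

theorem loop_eq_alt (t : Int) (anc : List Int) :
    find_anc_loop t anc = anc ++ (find_anc_alt t).drop 1 := by
  rw [find_anc_loop]
  split
  · next h =>
    rw [loop_eq_alt (t / 2)]
    rw [alt_cons t, alt_cons (t / 2)]
    simp [show ¬ t ≤ 1 by omega]
  · next h =>
    rw [alt_cons t]
    simp [show t ≤ 1 by omega]
termination_by t.toNat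
decreasing_by
  have h1 : (1:Int) < t := by omega
  have : t / 2 < t := by omega
  have : 0 ≤ t / 2 := by omega
  omega

-- ===== VERDICT (by name: the statement is the Claim_ definition above) =====
theorem find_anc_spec : Claim_equal_find_anc := by
  intro k _
  unfold Spec_find_anc find_anc
  rw [loop_eq_alt]
  conv_rhs => rw [alt_cons k]
  rw [alt_cons k]
  split <;> simp
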